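-- pv_equiv track=rewrite | github.com/alexxyye/Visual-Similarity | scripts/CountObject.py | find_min_max_ij
-- ===== SOURCE A (Python) =====
-- def find_min_max_ij(dic):
--     i_s =[]
--     j_s =[]
--     for tup in dic:
--         i_s.append(tup[0])
--         j_s.append(tup[1])
--     i_min,i_max = min(i_s),max(i_s)
--     j_min,j_max = min(j_s),max(j_s)
--     return i_min,i_max,j_min,j_max
-- ===== SOURCE B (Python) =====
-- def find_min_max_ij(dic):
--     it = iter(dic)
--     try:
--         i, j = next(it)
--     except StopIteration:
--         raise ValueError("find_min_max_ij() arg is an empty sequence")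
--     i_min = i_max = i
--     j_min = j_max = j
--     for i, j in it:
--         if i < i_min: i_min = i
--         if i > i_max: i_max = i
--         if j < j_min: j_min = j
--         if j > j_max: j_max = j
--     return i_min, i_max, j_min, j_max
-- ===== Notes on version B (the rewrite author's own statement) =====
-- stated objective: alternative
-- what changed: Single streaming pass keeping four running extremes, instead of building two coordinate lists and calling min/max on each; Pre_ excludes the empty list, on which A raises ValueError (min of empty sequence) and B raises ValueError too.
import Mathlib
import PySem

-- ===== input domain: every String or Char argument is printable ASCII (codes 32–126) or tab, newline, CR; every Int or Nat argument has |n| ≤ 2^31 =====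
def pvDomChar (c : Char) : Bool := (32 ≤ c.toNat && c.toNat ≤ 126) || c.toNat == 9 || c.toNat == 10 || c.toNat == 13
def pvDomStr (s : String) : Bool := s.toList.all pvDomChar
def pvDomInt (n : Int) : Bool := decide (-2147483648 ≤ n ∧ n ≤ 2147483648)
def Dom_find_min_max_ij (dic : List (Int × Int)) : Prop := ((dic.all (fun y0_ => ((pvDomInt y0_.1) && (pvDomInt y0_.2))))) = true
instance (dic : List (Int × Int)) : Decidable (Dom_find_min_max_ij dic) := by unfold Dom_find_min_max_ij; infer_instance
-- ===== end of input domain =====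

-- B replaces A's build-two-lists-then-min/max with one streaming pass over running extremes (objective: alternative, same cost).

-- ===== PORT A =====
-- loop appending tup[0] / tup[1] to i_s / j_s, then min/max of each list
def find_min_max_ij (dic : List (Int × Int)) : Int × Int × Int × Int :=
  let i_s := dic.foldl (fun acc tup => acc ++ [tup.1]) []
  let j_s := dic.foldl (fun acc tup => acc ++ [tup.2]) []
  ((PySem.List.min? i_s (fun y => y)).getD 0, (PySem.List.max? i_s (fun y => y)).getD 0,
   (PySem.List.min? j_s (fun y => y)).getD 0, (PySem.List.max? j_s (fun y => y)).getD 0)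

-- ===== PORT B =====
def findMinMaxGo (im iM jm jM : Int) : List (Int × Int) → Int × Int × Int × Int
  | [] => (im, iM, jm, jM)
  | (i, j) :: rest =>
      findMinMaxGo (if i < im then i else im) (if i > iM then i else iM)
                   (if j < jm then j else jm) (if j > jM then j else jM) rest

def find_min_max_ij_alt (dic : List (Int × Int)) : Int × Int × Int × Int :=
  match dic with
  | [] => (0, 0, 0, 0)   -- Python B raises ValueError here; outside Pre_
  | (i, j) :: rest => findMinMaxGo i i j j rest

-- ===== PRECONDITION & SPEC =====
-- Pre_ excludes the empty list, on which A raises ValueError (min() of empty sequence); B raises ValueError there too.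
def Pre_find_min_max_ij (dic : List (Int × Int)) : Prop := dic ≠ []
instance (dic : List (Int × Int)) : Decidable (Pre_find_min_max_ij dic) := by unfold Pre_find_min_max_ij; infer_instance
def pvWitness_find_min_max_ij : (List (Int × Int)) := [(1, 2), (3, -4)]

def Spec_find_min_max_ij (dic : List (Int × Int)) (out : Int × Int × Int × Int) : Prop := out = find_min_max_ij_alt dic
instance (dic : List (Int × Int)) (out : Int × Int × Int × Int) : Decidable (Spec_find_min_max_ij dic out) := by unfold Spec_find_min_max_ij; infer_instance

-- ===== CLAIM (what is proved, stated in full; the proofs are below) =====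
def Claim_equal_find_min_max_ij : Prop := ∀ (dic : List (Int × Int)), Dom_find_min_max_ij dic → Pre_find_min_max_ij dic → Spec_find_min_max_ij dic (find_min_max_ij dic)

-- ===== LEMMAS AND PROOFS =====

lemma foldl_append_fst (l : List (Int × Int)) (acc : List Int) :
    l.foldl (fun a (tup : Int × Int) => a ++ [tup.1]) acc = acc ++ l.map Prod.fst := by
  induction l generalizing acc with
  | nil => simp [List.foldl]
  | cons h t ih => simp [List.foldl, ih]

lemma foldl_append_snd (l : List (Int × Int)) (acc : List Int) :
    l.foldl (fun a (tup : Int × Int) => a ++ [tup.2]) acc = acc ++ l.map Prod.snd := by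
  induction l generalizing acc with
  | nil => simp [List.foldl]
  | cons h t ih => simp [List.foldl, ih]

lemma findMinMaxGo_eq (l : List (Int × Int)) (im iM jm jM : Int) :
    findMinMaxGo im iM jm jM l =
      (l.foldl (fun a (t : Int × Int) => min a t.1) im,
       l.foldl (fun a (t : Int × Int) => max a t.1) iM,
       l.foldl (fun a (t : Int × Int) => min a t.2) jm,
       l.foldl (fun a (t : Int × Int) => max a t.2) jM) := by
  induction l generalizing im iM jm jM with
  | nil => rfl
  | cons h t ih =>
      obtain ⟨i, j⟩ := h
      have h1 : (if i < im then i else im) = min im i := by split_ifs <;> omega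
      have h2 : (if i > iM then i else iM) = max iM i := by split_ifs <;> omega
      have h3 : (if j < jm then j else jm) = min jm j := by split_ifs <;> omega
      have h4 : (if j > jM then j else jM) = max jM j := by split_ifs <;> omega
      simp only [findMinMaxGo, List.foldl, ih, h1, h2, h3, h4]

-- ===== VERDICT (by name: the statement is the Claim_ definition above) =====
theorem find_min_max_ij_spec : Claim_equal_find_min_max_ij := by
  intro dic _ hpre
  unfold Spec_find_min_max_ij
  match dic with
  | [] => exact absurd rfl hpre
  | (i, j) :: rest =>
      show find_min_max_ij ((i, j) :: rest) = find_min_max_ij_alt ((i, j) :: rest)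
      unfold find_min_max_ij find_min_max_ij_alt
      rw [foldl_append_fst, foldl_append_snd]
      simp only [List.nil_append, List.map_cons, PySem.List.min?_id_cons, PySem.List.max?_id_cons,
        Option.getD_some, List.foldl_map, findMinMaxGo_eq]
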